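-- pv_equiv track=rewrite | github.com/ejbarton5554/990-toolkit | dashboard.py | filter_fields_by_stage1
-- ===== SOURCE A (Python) =====
-- def filter_fields_by_stage1(all_fields, field_to_cats, schedules, categories):
--     # type: (Dict, Dict, List[str], List[str]) -> Dict[str, Any]
--     """Union filter: field's schedule matches OR any category path matches."""
--     schedule_set = set(schedules)
--     result = {}
--     for name, info in all_fields.items():
--         # Check schedule match
--         if info.get("schedule", "") in schedule_set:
--             result[name] = info
--             continue
--         # Check category match
--         paths = field_to_cats.get(name, [])
--         for path in paths:
--             path_str = " > ".join(path)
--             for cat in categories: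
--                 if path_str == cat or path_str.startswith(cat + " > ") or cat.startswith(path_str + " > "):
--                     result[name] = info
--                     break
--             else:
--                 continue
--             break
--     return result
-- ===== SOURCE B (Python) =====
-- def filter_fields_by_stage1(all_fields, field_to_cats, schedules, categories):
--     """Union filter: schedule match OR category path match, via a hashed
--     category/ancestor-prefix index instead of scanning all categories per path."""
--     schedule_set = set(schedules)
--     cat_set = set(categories)
--     # every prefix of a category cut at a " > " occurrence: exactly the strings s
--     # with cat.startswith(s + " > ") for some category cat
--     anc = set()
--     for cat in categories:
--         for k in range(len(cat) - 2):
--             if cat[k:k + 3] == " > ":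
--                 anc.add(cat[:k])
--
--     def path_matches(path_str):
--         if path_str in cat_set or path_str in anc:
--             return True
--         for k in range(len(path_str) - 2):
--             if path_str[k:k + 3] == " > " and path_str[:k] in cat_set:
--                 return True
--         return False
--
--     result = {}
--     for name, info in all_fields.items():
--         if info.get("schedule", "") in schedule_set:
--             result[name] = info
--         elif any(path_matches(" > ".join(path)) for path in field_to_cats.get(name, [])):
--             result[name] = info
--     return result
-- ===== Notes on version B (the rewrite author's own statement) =====
-- stated objective: faster
-- what changed: Instead of comparing every path against every category with string startswith tests, B builds once a hash set of categories and a hash set of all their ' > '-boundary ancestor prefixes, so each path is checked by O(len(path_str)) set lookups independent of the number of categories.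
import Mathlib
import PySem

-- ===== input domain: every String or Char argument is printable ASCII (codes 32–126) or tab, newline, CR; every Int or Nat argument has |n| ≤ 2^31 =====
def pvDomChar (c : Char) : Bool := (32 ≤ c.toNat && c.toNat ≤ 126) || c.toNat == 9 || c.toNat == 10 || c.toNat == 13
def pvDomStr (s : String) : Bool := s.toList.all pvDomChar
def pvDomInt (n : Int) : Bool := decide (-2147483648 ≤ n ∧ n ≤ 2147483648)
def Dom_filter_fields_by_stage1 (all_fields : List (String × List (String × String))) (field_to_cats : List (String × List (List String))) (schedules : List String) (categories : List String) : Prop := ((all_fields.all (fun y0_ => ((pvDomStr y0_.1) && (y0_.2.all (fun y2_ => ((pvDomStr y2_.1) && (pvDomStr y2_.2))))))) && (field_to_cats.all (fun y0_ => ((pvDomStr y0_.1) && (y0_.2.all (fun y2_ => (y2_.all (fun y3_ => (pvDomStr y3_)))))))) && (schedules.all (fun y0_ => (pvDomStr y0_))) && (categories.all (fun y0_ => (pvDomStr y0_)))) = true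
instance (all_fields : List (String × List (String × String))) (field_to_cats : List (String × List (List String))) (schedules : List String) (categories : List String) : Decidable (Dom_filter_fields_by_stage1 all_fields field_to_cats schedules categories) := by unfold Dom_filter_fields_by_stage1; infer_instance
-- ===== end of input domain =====

-- B replaces A's scan of all categories per path by a hashed index of categories and of their
-- " > "-boundary ancestor prefixes; equivalence of the return value is proved (no side effects).

-- ===== PORT A =====
-- the inner 'for cat in categories' test of A, per (path_str, cat)
def pyCatCond (path_str cat : String) : Bool :=
  path_str == cat
    || PySem.Str.startswith path_str (cat ++ " > ")
    || PySem.Str.startswith cat (path_str ++ " > ")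

def filter_fields_by_stage1 (all_fields : List (String × List (String × String))) (field_to_cats : List (String × List (List String))) (schedules : List String) (categories : List String) : List (String × List (String × String)) :=
  let schedule_set : PySem.Set String := PySem.Set.ofList schedules
  -- the for/break/else ladder sets result[name] iff some path has some matching cat
  (all_fields.foldl (fun (result : PySem.Dict String (List (String × String))) nf =>
      if schedule_set.contains (PySem.Dict.getD (PySem.Dict.mk nf.2) "schedule" "") then
        result.insert nf.1 nf.2
      else if (PySem.Dict.getD (PySem.Dict.mk field_to_cats) nf.1 []).any
          (fun path => categories.any (fun cat => pyCatCond (PySem.Str.join " > " path) cat)) then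
        result.insert nf.1 nf.2
      else result)
    PySem.Dict.empty).items

-- ===== PORT B =====
-- ' > ' as code points; slicing cat[k:k+3] / cat[:k] is ported as take/drop on toList (exact on code points)
def bSep : List Char := [' ', '>', ' ']

-- Source B: anc = set(); for cat in categories: for k in range(len(cat)-2): if cat[k:k+3]==" > ": anc.add(cat[:k])
def bAnc (categories : List String) : PySem.Set String :=
  categories.foldl (fun anc cat =>
      (List.range (cat.toList.length - 2)).foldl
        (fun anc k =>
          if (cat.toList.drop k).take 3 = bSep then anc.add (String.ofList (cat.toList.take k))
          else anc)
        anc)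
    PySem.Set.empty

-- Source B's path_matches
def bPathMatch (cat_set anc : PySem.Set String) (p : String) : Bool :=
  cat_set.contains p || anc.contains p
    || (List.range (p.toList.length - 2)).any
        (fun k => decide ((p.toList.drop k).take 3 = bSep)
                    && cat_set.contains (String.ofList (p.toList.take k)))

def filter_fields_by_stage1_alt (all_fields : List (String × List (String × String))) (field_to_cats : List (String × List (List String))) (schedules : List String) (categories : List String) : List (String × List (String × String)) :=
  let schedule_set : PySem.Set String := PySem.Set.ofList schedules
  let cat_set : PySem.Set String := PySem.Set.ofList categories
  let anc : PySem.Set String := bAnc categories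
  (all_fields.foldl (fun (result : PySem.Dict String (List (String × String))) nf =>
      if schedule_set.contains (PySem.Dict.getD (PySem.Dict.mk nf.2) "schedule" "") then
        result.insert nf.1 nf.2
      else if (PySem.Dict.getD (PySem.Dict.mk field_to_cats) nf.1 []).any
          (fun path => bPathMatch cat_set anc (PySem.Str.join " > " path)) then
        result.insert nf.1 nf.2
      else result)
    PySem.Dict.empty).items

-- ===== PRECONDITION & SPEC =====
def Spec_filter_fields_by_stage1 (all_fields : List (String × List (String × String))) (field_to_cats : List (String × List (List String))) (schedules : List String) (categories : List String) (out : List (String × List (String × String))) : Prop := out = filter_fields_by_stage1_alt all_fields field_to_cats schedules categories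
instance (all_fields : List (String × List (String × String))) (field_to_cats : List (String × List (List String))) (schedules : List String) (categories : List String) (out : List (String × List (String × String))) : Decidable (Spec_filter_fields_by_stage1 all_fields field_to_cats schedules categories out) := by unfold Spec_filter_fields_by_stage1; infer_instance

-- ===== CLAIM (what is proved, stated in full; the proofs are below) =====
def Claim_equal_filter_fields_by_stage1 : Prop := ∀ (all_fields : List (String × List (String × String))) (field_to_cats : List (String × List (List String))) (schedules : List String) (categories : List String), Dom_filter_fields_by_stage1 all_fields field_to_cats schedules categories → Spec_filter_fields_by_stage1 all_fields field_to_cats schedules categories (filter_fields_by_stage1 all_fields field_to_cats schedules categories)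

-- ===== LEMMAS AND PROOFS =====

-- 'c ++ " > " is a prefix of p' is exactly 'some " > "-boundary cut of p at position k has prefix c'
lemma prefix_sep_iff (p c : List Char) :
    (c ++ bSep) <+: p ↔ ∃ k, k < p.length - 2 ∧ (p.drop k).take 3 = bSep ∧ p.take k = c := by
  constructor
  · rintro ⟨t, ht⟩
    refine ⟨c.length, ?_, ?_, ?_⟩
    · have := congrArg List.length ht
      simp [bSep] at this
      omega
    · rw [← ht, List.append_assoc, List.drop_left]
      rfl
    · rw [← ht, List.append_assoc, List.take_left]
  · rintro ⟨k, hk, hsep, htake⟩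
    refine ⟨(p.drop k).drop 3, ?_⟩
    rw [← htake, ← hsep, List.append_assoc, List.take_append_drop, List.take_append_drop]

-- membership in the inner accumulator loop of bAnc, for one cat
lemma mem_bAnc_inner (cat : String) (anc : PySem.Set String) (s : String) :
    s ∈ (List.range (cat.toList.length - 2)).foldl
          (fun anc k =>
            if (cat.toList.drop k).take 3 = bSep then anc.add (String.ofList (cat.toList.take k))
            else anc) anc
      ↔ s ∈ anc ∨ (s.toList ++ bSep) <+: cat.toList := by
  rw [prefix_sep_iff]
  induction (cat.toList.length - 2) generalizing anc with
  | zero => simp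
  | succ n ih =>
    rw [List.range_succ, List.foldl_append]
    simp only [List.foldl_cons, List.foldl_nil]
    split
    · rename_i hsep
      rw [PySem.Set.mem_add, ih]
      constructor
      · rintro ((h | ⟨k, hk, h1, h2⟩) | heq)
        · exact Or.inl h
        · exact Or.inr ⟨k, by omega, h1, h2⟩
        · refine Or.inr ⟨n, by omega, hsep, ?_⟩
          rw [heq]; simp
      · rintro (h | ⟨k, hk, h1, h2⟩)
        · exact Or.inl (Or.inl h)
        · by_cases hkn : k = n
          · refine Or.inr ?_
            subst hkn
            apply String.toList_inj.mp
            simp [h2]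
          · exact Or.inl (Or.inr ⟨k, by omega, h1, h2⟩)
    · rename_i hsep
      rw [ih]
      constructor
      · rintro (h | ⟨k, hk, h1, h2⟩)
        · exact Or.inl h
        · exact Or.inr ⟨k, by omega, h1, h2⟩
      · rintro (h | ⟨k, hk, h1, h2⟩)
        · exact Or.inl h
        · refine Or.inr ⟨k, ?_, h1, h2⟩
          rcases Nat.lt_succ_iff_lt_or_eq.mp hk with h | h
          · exact h
          · subst h; rw [h1] at hsep; exact absurd rfl hsep

-- membership in bAnc: s has some category strictly below it (cat starts with s + " > ")
lemma mem_bAnc (categories : List String) (s : String) :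
    s ∈ bAnc categories ↔ ∃ cat ∈ categories, (s.toList ++ bSep) <+: cat.toList := by
  unfold bAnc
  induction categories using List.reverseRecOn with
  | nil => simp
  | append_singleton l x ih =>
    rw [List.foldl_append]
    simp only [List.foldl_cons, List.foldl_nil]
    rw [mem_bAnc_inner, ih]
    simp only [List.mem_append, List.mem_singleton]
    constructor
    · rintro (⟨cat, hc, hp⟩ | hp)
      · exact ⟨cat, Or.inl hc, hp⟩
      · exact ⟨x, Or.inr rfl, hp⟩
    · rintro ⟨cat, hc | hc, hp⟩
      · exact Or.inl ⟨cat, hc, hp⟩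
      · subst hc; exact Or.inr hp

-- the per-path test of A equals the per-path test of B (with B's indexes built from categories)
lemma match_eq (categories : List String) (p : String) :
    categories.any (fun cat => pyCatCond p cat)
      = bPathMatch (PySem.Set.ofList categories) (bAnc categories) p := by
  rw [Bool.eq_iff_iff]
  unfold bPathMatch pyCatCond
  simp only [List.any_eq_true, Bool.or_eq_true, beq_iff_eq, PySem.Str.startswith_eq,
    PySem.Chars.startswith_iff, String.toList_append, PySem.Set.contains,
    List.contains_eq_mem, decide_eq_true_eq, PySem.Set.mem_ofList, Bool.and_eq_true,
    List.mem_range]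
  have hsep : (" > " : String).toList = bSep := by simp [bSep]
  simp only [hsep, mem_bAnc]
  constructor
  · rintro ⟨cat, hc, (heq | hpre) | hanc⟩
    · exact Or.inl (Or.inl (heq ▸ hc))
    · obtain ⟨k, hk, h1, h2⟩ := (prefix_sep_iff _ _).mp hpre
      refine Or.inr ⟨k, hk, h1, ?_⟩
      have : String.ofList (p.toList.take k) = cat := by
        apply String.toList_inj.mp; simp [h2]
      rw [this]; exact hc
    · exact Or.inl (Or.inr ⟨cat, hc, hanc⟩)
  · rintro ((hc | ⟨cat, hc, hpre⟩) | ⟨k, hk, h1, h2⟩)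
    · exact ⟨p, hc, Or.inl (Or.inl rfl)⟩
    · exact ⟨cat, hc, Or.inr hpre⟩
    · refine ⟨String.ofList (p.toList.take k), h2, Or.inl (Or.inr ?_)⟩
      exact (prefix_sep_iff _ _).mpr ⟨k, hk, h1, by simp⟩

-- ===== VERDICT (by name: the statement is the Claim_ definition above) =====
theorem filter_fields_by_stage1_spec : Claim_equal_filter_fields_by_stage1 := by
  intro all_fields field_to_cats schedules categories _
  unfold Spec_filter_fields_by_stage1 filter_fields_by_stage1 filter_fields_by_stage1_alt
  simp only [match_eq]
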